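-- pv_equiv track=rewrite | github.com/TySamTakoy/Bitrix_2025_Internship | src/main/python/ucucuga/md5_fib_ctf.py | group_indices_by_span
-- ===== SOURCE A (Python) =====
-- from typing import Iterator, List, Tuple
--
-- def group_indices_by_span(indices: List[int], max_span: int) -> Iterator[List[int]]:
--     """Группирует отсортированный список индексов в подсписки, span <= max_span."""
--     if not indices:
--         return
--     group = [indices[0]]
--     start = indices[0]
--     for idx in indices[1:]:
--         if idx - start + 1 <= max_span:
--             group.append(idx)
--         else:
--             yield group
--             group = [idx]
--             start = idx
--     if group:
--         yield group
-- ===== SOURCE B (Python) =====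
-- from typing import Iterator, List
--
-- def group_indices_by_span(indices: List[int], max_span: int) -> Iterator[List[int]]:
--     """One pass records cut positions, then slices of the input are yielded between cuts."""
--     if not indices:
--         return
--     cuts = []
--     start = indices[0]
--     for pos, idx in enumerate(indices[1:], 1):
--         if idx - start + 1 > max_span:
--             cuts.append(pos)
--             start = idx
--     prev = 0
--     for cut in cuts:
--         yield indices[prev:cut]
--         prev = cut
--     yield indices[prev:]
-- ===== Notes on version B (the rewrite author's own statement) =====
-- stated objective: alternative
-- what changed: B first scans once recording only cut positions (where a new group must start), then yields slices of the input between consecutive cuts, instead of A's element-by-element accumulation of each group list.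
import Mathlib
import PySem

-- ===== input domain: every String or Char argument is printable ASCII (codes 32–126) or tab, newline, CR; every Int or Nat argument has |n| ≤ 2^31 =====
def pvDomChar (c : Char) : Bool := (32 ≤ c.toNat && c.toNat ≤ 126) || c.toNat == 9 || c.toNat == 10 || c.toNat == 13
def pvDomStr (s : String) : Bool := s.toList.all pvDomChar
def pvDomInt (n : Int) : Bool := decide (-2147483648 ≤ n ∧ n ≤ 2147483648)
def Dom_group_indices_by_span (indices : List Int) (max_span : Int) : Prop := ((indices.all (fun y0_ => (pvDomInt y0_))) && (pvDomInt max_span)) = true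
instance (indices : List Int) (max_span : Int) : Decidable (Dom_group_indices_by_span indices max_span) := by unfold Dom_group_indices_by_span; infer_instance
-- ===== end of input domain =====

-- B separates boundary-finding (one scan recording cut positions) from emission (slicing the
-- input between consecutive cuts), instead of A's element-by-element group accumulation;
-- objective: alternative (same O(n) cost, different decomposition).


-- ===== PORT A =====
-- Literal port of A: fold over indices[1:] with state (yielded groups, current group, start),
-- then the trailing 'if group: yield group'.
def group_indices_by_span (indices : List Int) (max_span : Int) : List (List Int) :=
  match indices with
  | [] => []
  | x :: _ =>
    let st := (PySem.List.slice indices (some 1) none).foldl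
      (fun (s : List (List Int) × List Int × Int) idx =>
        if idx - s.2.2 + 1 ≤ max_span then (s.1, s.2.1 ++ [idx], s.2.2)
        else (s.1 ++ [s.2.1], [idx], idx)) ([], [x], x)
    if st.2.1.isEmpty then st.1 else st.1 ++ [st.2.1]

-- ===== PORT B =====
-- Literal port of B: first fold records cut positions (enumerate over indices[1:], start 1),
-- second fold emits slices indices[prev:cut], then the final slice indices[prev:].
def group_indices_by_span_alt (indices : List Int) (max_span : Int) : List (List Int) :=
  match indices with
  | [] => []
  | x :: _ =>
    let cs := (PySem.List.enumerate (PySem.List.slice indices (some 1) none) 1).foldl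
      (fun (s : List Int × Int) pi =>
        if pi.2 - s.2 + 1 > max_span then (s.1 ++ [pi.1], pi.2) else s) ([], x)
    let fin := cs.1.foldl
      (fun (s : List (List Int) × Int) cut =>
        (s.1 ++ [PySem.List.slice indices (some s.2) (some cut)], cut)) ([], 0)
    fin.1 ++ [PySem.List.slice indices (some fin.2) none]

-- ===== PRECONDITION & SPEC =====
def Spec_group_indices_by_span (indices : List Int) (max_span : Int) (out : List (List Int)) : Prop := out = group_indices_by_span_alt indices max_span
instance (indices : List Int) (max_span : Int) (out : List (List Int)) : Decidable (Spec_group_indices_by_span indices max_span out) := by unfold Spec_group_indices_by_span; infer_instance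

-- ===== CLAIM (what is proved, stated in full; the proofs are below) =====
def Claim_equal_group_indices_by_span : Prop := ∀ (indices : List Int) (max_span : Int), Dom_group_indices_by_span indices max_span → Spec_group_indices_by_span indices max_span (group_indices_by_span indices max_span)

-- ===== LEMMAS AND PROOFS =====

-- Recursive form of A's grouping loop.
def gA (ms : Int) : List Int → List Int → Int → List (List Int)
  | [], g, _ => [g]
  | idx :: r, g, st =>
    if idx - st + 1 ≤ ms then gA ms r (g ++ [idx]) st else g :: gA ms r [idx] idx

-- Recursive form of B's cut-position loop.
def gB (ms : Int) : List (Int × Int) → Int → List Int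
  | [], _ => []
  | (pos, idx) :: r, st =>
    if idx - st + 1 > ms then pos :: gB ms r idx else gB ms r st

-- Recursive form of B's emission loop (including the trailing slice).
def emit (xs : List Int) : List Int → Int → List (List Int)
  | [], prev => [PySem.List.slice xs (some prev) none]
  | c :: cs, prev => PySem.List.slice xs (some prev) (some c) :: emit xs cs c

-- A's foldl (with the trailing guard) equals the recursive form, prefixed by the emitted part.
theorem foldA_eq (ms : Int) : ∀ (rest : List Int) (done : List (List Int)) (g : List Int) (st : Int), g ≠ [] →
    (let s := rest.foldl
      (fun (s : List (List Int) × List Int × Int) idx =>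
        if idx - s.2.2 + 1 ≤ ms then (s.1, s.2.1 ++ [idx], s.2.2)
        else (s.1 ++ [s.2.1], [idx], idx)) (done, g, st)
     ; if s.2.1.isEmpty then s.1 else s.1 ++ [s.2.1]) = done ++ gA ms rest g st := by
  intro rest
  induction rest with
  | nil => intro done g st hg; simp [gA, List.isEmpty_iff, hg]
  | cons idx r ih =>
    intro done g st hg
    simp only [List.foldl_cons, gA]
    by_cases h : idx - st + 1 ≤ ms
    · simp only [h, if_pos]
      exact ih done (g ++ [idx]) st (by simp)
    · simp only [h, if_neg, not_false_iff]
      rw [ih (done ++ [g]) [idx] idx (by simp)]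
      simp

-- B's cut-recording foldl equals the recursive form (first component).
theorem foldB_eq (ms : Int) : ∀ (pairs : List (Int × Int)) (acc : List Int) (st : Int),
    (pairs.foldl
      (fun (s : List Int × Int) pi =>
        if pi.2 - s.2 + 1 > ms then (s.1 ++ [pi.1], pi.2) else s) (acc, st)).1
      = acc ++ gB ms pairs st := by
  intro pairs
  induction pairs with
  | nil => intro acc st; simp [gB]
  | cons p r ih =>
    intro acc st
    obtain ⟨pos, idx⟩ := p
    simp only [List.foldl_cons, gB]
    by_cases h : idx - st + 1 > ms
    · simp only [h, if_pos]; rw [ih (acc ++ [pos]) idx]; simp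
    · simp only [h, if_neg, not_false_iff]; exact ih acc st

-- B's emission foldl (plus the trailing slice) equals the recursive form.
theorem foldE_eq (xs : List Int) : ∀ (cuts : List Int) (acc : List (List Int)) (prev : Int),
    (let fin := cuts.foldl
      (fun (s : List (List Int) × Int) cut =>
        (s.1 ++ [PySem.List.slice xs (some s.2) (some cut)], cut)) (acc, prev)
     ; fin.1 ++ [PySem.List.slice xs (some fin.2) none]) = acc ++ emit xs cuts prev := by
  intro cuts
  induction cuts with
  | nil => intro acc prev; simp [emit]
  | cons c cs ih =>
    intro acc prev
    simp only [List.foldl_cons, emit]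
    rw [ih (acc ++ [PySem.List.slice xs (some prev) (some c)]) c]
    simp

-- slice xs prev (pos+1) = slice xs prev pos ++ [idx] when xs.drop pos = idx :: r and prev ≤ pos.
theorem slice_snoc (xs : List Int) (prev pos : Nat) (idx : Int) (r : List Int)
    (hd : xs.drop pos = idx :: r) (hle : prev ≤ pos) :
    PySem.List.slice xs (some ((pos : Int))) (some ((pos : Int) + 1)) = [idx] ∧
    PySem.List.slice xs (some ((prev : Int))) (some ((pos : Int) + 1))
      = PySem.List.slice xs (some ((prev : Int))) (some ((pos : Int))) ++ [idx] := by
  have h1 : ((pos : Int) + 1) = ((pos + 1 : Nat) : Int) := by push_cast; ring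
  rw [h1, PySem.List.slice_natCast, PySem.List.slice_natCast, PySem.List.slice_natCast]
  constructor
  · simp only [Nat.add_sub_cancel_left]
    rw [hd]; rfl
  · have hlen : pos < xs.length := by
      by_contra hc
      rw [List.drop_eq_nil_of_le (by omega)] at hd; exact (List.cons_ne_nil _ _).symm hd
    have hget : (xs.drop prev)[pos - prev]? = some idx := by
      rw [List.getElem?_drop]
      have h0 : (List.drop pos xs)[0]? = xs[pos + 0]? := List.getElem?_drop
      rw [hd] at h0
      have heq : prev + (pos - prev) = pos + 0 := by omega
      rw [heq, ← h0]
      rfl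
    have : pos + 1 - prev = (pos - prev) + 1 := by omega
    rw [this, List.take_add_one, hget]
    rfl

-- Main invariant: emitting B's cuts of the suffix equals A's grouping of that suffix,
-- with the pending group being the slice indices[prev:pos].
theorem main_inv (ms : Int) (xs : List Int) : ∀ (rest : List Int) (pos prev : Nat) (st : Int),
    xs.drop pos = rest → prev ≤ pos →
    emit xs (gB ms (PySem.List.enumerate rest (pos : Int)) st) ((prev : Int))
      = gA ms rest (PySem.List.slice xs (some ((prev : Int))) (some ((pos : Int)))) st := by
  intro rest
  induction rest with
  | nil =>
    intro pos prev st hd hle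
    simp only [PySem.List.enumerate_nil, gB, emit, gA]
    rw [PySem.List.slice_natCast, PySem.List.slice_from_natCast]
    congr 1
    have hlen : xs.length ≤ pos := List.drop_eq_nil_iff.mp hd
    exact (List.take_of_length_le (by simp; omega)).symm
  | cons idx r ih =>
    intro pos prev st hd hle
    rw [PySem.List.enumerate_cons]
    simp only [gB, gA]
    obtain ⟨h1, h2⟩ := slice_snoc xs prev pos idx r hd hle
    have hd' : xs.drop (pos + 1) = r := by
      have h := congrArg (List.drop 1) hd
      rw [List.drop_drop] at h
      simpa [Nat.add_comm] using h
    have hcast : ((pos : Int) + 1) = ((pos + 1 : Nat) : Int) := by push_cast; ring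
    by_cases h : idx - st + 1 ≤ ms
    · rw [if_neg (by omega), if_pos h]
      rw [hcast, ih (pos + 1) prev st hd' (by omega)]
      rw [← h2, hcast]
    · rw [if_pos (by omega), if_neg h]
      simp only [emit]
      rw [hcast, ih (pos + 1) pos idx hd' (by omega)]
      rw [← h1, hcast]

-- ===== VERDICT (by name: the statement is the Claim_ definition above) =====
theorem group_indices_by_span_spec : Claim_equal_group_indices_by_span := by
  intro indices max_span _
  unfold Spec_group_indices_by_span group_indices_by_span group_indices_by_span_alt
  match indices with
  | [] => rfl
  | x :: rest =>
    simp only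
    rw [foldA_eq max_span (PySem.List.slice (x :: rest) (some 1) none) [] [x] x (by simp)]
    rw [foldB_eq, foldE_eq]
    simp only [List.nil_append]
    rw [PySem.List.slice_from_one]
    simp only [List.tail_cons]
    have h0 : (0 : Int) = ((0 : Nat) : Int) := rfl
    have h1 : (1 : Int) = ((1 : Nat) : Int) := rfl
    rw [h0, h1, main_inv max_span (x :: rest) rest 1 0 x (by rfl) (by omega)]
    rw [PySem.List.slice_natCast]
    rfl
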